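-- pv_equiv track=rewrite | github.com/kmatch98/smackdown | smackDown.py | findTabLevel
-- ===== SOURCE A (Python) =====
-- def findTabLevel(textLine):
--     spaceCount=0
--     tabLevel=0
--     spacesPerTab = 4 # how many spaces equals a tab. should be defined at higher level ****
--     for character in textLine:
--         if character == '\t': # increase the tab level counter
--             spaceCount=0 # reset the space counter to zero
--             tabLevel += 1
--         elif character == ' ':
--             spaceCount += 1 # increase space counter
--             if spaceCount >= spacesPerTab: # enough spaces were encountered to equal one tab
--                 spaceCount=0 # reset the space counter to zero
--                 tabLevel += 1
--         else: # found a character other than a tab or whitespace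
--             break
--     return tabLevel
-- ===== SOURCE B (Python) =====
-- def findTabLevel(textLine):
--     # Extract the leading run of spaces/tabs, split it on tabs,
--     # count tabs plus floor(len/4) for each space run.
--     end = 0
--     while end < len(textLine) and textLine[end] in ' \t':
--         end += 1
--     parts = textLine[:end].split('\t')
--     return len(parts) - 1 + sum(len(p) // 4 for p in parts)
-- ===== Notes on version B (the rewrite author's own statement) =====
-- stated objective: simpler
-- what changed: Replaces the running space-counter state machine by extracting the leading whitespace prefix, splitting it on tabs, and summing tab count plus len(run)//4 over the space runs.
import Mathlib
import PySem

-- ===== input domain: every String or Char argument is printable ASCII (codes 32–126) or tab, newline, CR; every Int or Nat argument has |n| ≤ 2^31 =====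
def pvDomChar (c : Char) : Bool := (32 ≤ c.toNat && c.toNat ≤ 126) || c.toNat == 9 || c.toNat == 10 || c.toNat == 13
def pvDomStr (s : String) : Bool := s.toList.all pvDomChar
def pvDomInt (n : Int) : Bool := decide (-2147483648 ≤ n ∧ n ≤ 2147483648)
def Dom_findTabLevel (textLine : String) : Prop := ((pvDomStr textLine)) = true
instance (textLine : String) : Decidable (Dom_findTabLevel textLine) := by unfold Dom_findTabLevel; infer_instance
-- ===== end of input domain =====

-- B replaces A's running space-counter state machine by prefix-extraction, split on tabs, and a sum (simpler decomposition, same cost).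

-- ===== PORT A =====
-- A's for-loop with early break, carrying (spaceCount, tabLevel); spacesPerTab = 4.
def findTabLevelLoop : List Char → Int → Int → Int
  | [], _, tabLevel => tabLevel
  | c :: rest, spaceCount, tabLevel =>
    if c = '\t' then
      findTabLevelLoop rest 0 (tabLevel + 1)
    else if c = ' ' then
      if spaceCount + 1 ≥ 4 then findTabLevelLoop rest 0 (tabLevel + 1)
      else findTabLevelLoop rest (spaceCount + 1) tabLevel
    else tabLevel

def findTabLevel (textLine : String) : Int :=
  findTabLevelLoop textLine.toList 0 0

-- ===== PORT B =====
-- hand port of str.split('\t') on the char list (exact: keeps empty pieces, result always nonempty)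
def splitTab : List Char → List (List Char)
  | [] => [[]]
  | c :: r =>
    if c = '\t' then [] :: splitTab r
    else
      match splitTab r with
      | [] => [[c]]   -- unreachable: splitTab never returns []
      | h :: t => (c :: h) :: t

def findTabLevel_alt (textLine : String) : Int :=
  let pre := textLine.toList.takeWhile (fun c => c == ' ' || c == '\t')
  let parts := splitTab pre
  ((parts.length - 1 + (parts.map (fun p => p.length / 4)).sum : Nat) : Int)

-- ===== PRECONDITION & SPEC =====
def Spec_findTabLevel (textLine : String) (out : Int) : Prop := out = findTabLevel_alt textLine
instance (textLine : String) (out : Int) : Decidable (Spec_findTabLevel textLine out) := by unfold Spec_findTabLevel; infer_instance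

-- ===== CLAIM (what is proved, stated in full; the proofs are below) =====
def Claim_equal_findTabLevel : Prop := ∀ (textLine : String), Dom_findTabLevel textLine → Spec_findTabLevel textLine (findTabLevel textLine)

-- ===== LEMMAS AND PROOFS =====

-- value of B's computation on a prefix, with sc spaces already credited to the first run
def valB (sc : Nat) (l : List Char) : Nat :=
  let parts := splitTab l
  parts.tail.length + (sc + (parts.headI).length) / 4
    + ((parts.tail).map (fun p => p.length / 4)).sum

theorem splitTab_ne_nil (l : List Char) : splitTab l ≠ [] := by
  cases l with
  | nil => simp [splitTab]
  | cons c r =>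
    simp only [splitTab]
    split
    · simp
    · cases h : splitTab r <;> simp

theorem loop_eq_valB (l : List Char) (sc : Nat) (tl : Int) (hsc : sc < 4) :
    findTabLevelLoop l (sc : Int) tl
      = tl + (valB sc (l.takeWhile (fun c => c == ' ' || c == '\t')) : Int) := by
  induction l generalizing sc tl with
  | nil =>
    simp [findTabLevelLoop, valB, splitTab, Nat.div_eq_of_lt hsc]
  | cons c r ih =>
    by_cases ht : c = '\t'
    · subst ht
      simp only [findTabLevelLoop, List.takeWhile]
      norm_num
      rw [show ((0 : Int)) = ((0 : Nat) : Int) by norm_num, ih 0 _ (by norm_num)]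
      simp only [valB, splitTab]
      cases h : splitTab (r.takeWhile (fun c => c == ' ' || c == '\t')) with
      | nil => exact absurd h (splitTab_ne_nil _)
      | cons p ps =>
        simp [List.headI]
        omega
    · by_cases hs : c = ' '
      · subst hs
        simp only [findTabLevelLoop, if_neg (show ¬(' ' = '\t') by decide), List.takeWhile]
        norm_num
        have hsplit : splitTab (' ' :: r.takeWhile (fun c => c == ' ' || c == '\t'))
            = match splitTab (r.takeWhile (fun c => c == ' ' || c == '\t')) with
              | [] => [[' ']]
              | h :: t => (' ' :: h) :: t := by
          simp [splitTab]
        cases h : splitTab (r.takeWhile (fun c => c == ' ' || c == '\t')) with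
        | nil => exact absurd h (splitTab_ne_nil _)
        | cons p ps =>
          rw [h] at hsplit
          by_cases h4 : sc = 3
          · subst h4
            rw [if_pos (by norm_num)]
            rw [show ((0 : Int)) = ((0 : Nat) : Int) by norm_num, ih 0 _ (by norm_num)]
            simp only [valB, hsplit, h, List.tail_cons, List.headI]
            have hd : (3 + (' ' :: p).length) / 4 = 1 + p.length / 4 := by
              simp [List.length_cons]; omega
            rw [hd]
            push_cast
            omega
          · rw [if_neg (by omega)]
            rw [show ((sc : Int) + 1) = ((sc + 1 : Nat) : Int) by push_cast; ring,
                ih (sc + 1) _ (by omega)]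
            simp only [valB, hsplit, h, List.tail_cons, List.headI]
            have hd : (sc + (' ' :: p).length) = (sc + 1 + p.length) := by
              simp [List.length_cons]; omega
            rw [hd]
      · have hb : (c == ' ' || c == '\t') = false := by
          simp [ht, hs]
        simp only [findTabLevelLoop, if_neg ht, if_neg hs, List.takeWhile, hb]
        simp [valB, splitTab, Nat.div_eq_of_lt hsc]

-- ===== VERDICT (by name: the statement is the Claim_ definition above) =====
theorem findTabLevel_spec : Claim_equal_findTabLevel := by
  intro textLine _
  unfold Spec_findTabLevel findTabLevel findTabLevel_alt
  have hmain := loop_eq_valB textLine.toList 0 0 (by norm_num)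
  rw [Nat.cast_zero] at hmain
  rw [hmain]
  unfold valB
  cases h : splitTab (textLine.toList.takeWhile (fun c => c == ' ' || c == '\t')) with
  | nil => exact absurd h (splitTab_ne_nil _)
  | cons p ps =>
    simp only [h, List.tail_cons, List.headI, List.length_cons, List.map_cons, List.sum_cons]
    push_cast
    omega
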